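-- pv_equiv track=rewrite | github.com/Calebsmash1/CS-Principles-CS-50_Portfolio | chapter5/sentimental-readability/readability.py | calculate_letters
-- ===== SOURCE A (Python) =====
-- def calculate_letters(text):
--     # Starts a counter for the letters
--     letters = 0
--     # Defines what are letters
--     special_char = ["a", "b", "c", "d", "e", "f", "g", "h", "i", "j", "k", "l", "m", "n", "o", "p", "q", "r", "s", "t", "u", "v", "w", "x", "y",
--                     "z", "Q", "W", "E", "R", "T", "Y", "U", "I", "O", "P", "L", "K", "J", "H", "G", "F", "D", "S", "A", "Z", "X", "C", "V", "B", "N", "M",]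
--
--     # Loops through text looking for letters and returns them
--     for char in text:
--         if char in special_char:
--             letters += 1
--     return letters
-- ===== SOURCE B (Python) =====
-- def calculate_letters(text):
--     # Table-first: build a character frequency table in one pass, then sum the
--     # counts of the distinct characters that are among the 52 ASCII letters.
--     ascii_letters = "abcdefghijklmnopqrstuvwxyzABCDEFGHIJKLMNOPQRSTUVWXYZ"
--     freq = {}
--     for ch in text:
--         freq[ch] = freq.get(ch, 0) + 1
--     return sum(n for ch, n in freq.items() if ch in ascii_letters)
-- ===== Notes on version B (the rewrite author's own statement) =====
-- stated objective: alternative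
-- what changed: B builds a frequency table of all characters in one pass and then sums the counts of the distinct characters that are ASCII letters, instead of testing every character of the text against a 52-element list.
import Mathlib
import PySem

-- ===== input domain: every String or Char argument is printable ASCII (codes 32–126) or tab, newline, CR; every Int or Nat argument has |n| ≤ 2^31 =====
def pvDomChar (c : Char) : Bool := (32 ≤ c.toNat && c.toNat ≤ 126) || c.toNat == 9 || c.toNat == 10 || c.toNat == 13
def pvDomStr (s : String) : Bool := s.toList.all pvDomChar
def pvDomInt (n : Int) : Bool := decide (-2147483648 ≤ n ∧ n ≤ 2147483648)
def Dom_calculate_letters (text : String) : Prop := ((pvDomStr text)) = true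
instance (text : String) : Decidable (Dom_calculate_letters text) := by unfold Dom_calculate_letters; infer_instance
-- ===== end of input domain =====

-- B replaces A's per-character scan against a 52-element list by a frequency table built
-- first, summing the counts of the distinct characters that are ASCII letters (alternative
-- decomposition; same exact result).

-- ===== PORT A =====
def pvSpecialChar : List Char :=
  ['a', 'b', 'c', 'd', 'e', 'f', 'g', 'h', 'i', 'j', 'k', 'l', 'm', 'n', 'o', 'p', 'q', 'r',
   's', 't', 'u', 'v', 'w', 'x', 'y', 'z', 'Q', 'W', 'E', 'R', 'T', 'Y', 'U', 'I', 'O', 'P',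
   'L', 'K', 'J', 'H', 'G', 'F', 'D', 'S', 'A', 'Z', 'X', 'C', 'V', 'B', 'N', 'M']

def calculate_letters (text : String) : Int :=
  text.toList.foldl (fun letters char =>
    if pvSpecialChar.contains char then letters + 1 else letters) 0

-- ===== PORT B =====
def pvAsciiLetters : List Char :=
  "abcdefghijklmnopqrstuvwxyzABCDEFGHIJKLMNOPQRSTUVWXYZ".toList

def calculate_letters_alt (text : String) : Int :=
  let freq : PySem.Dict Char Int :=
    text.toList.foldl (fun d ch => d.insert ch (d.getD ch 0 + 1)) PySem.Dict.empty
  freq.items.foldl (fun acc kv =>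
    if pvAsciiLetters.contains kv.1 then acc + kv.2 else acc) 0

-- ===== PRECONDITION & SPEC =====
def Spec_calculate_letters (text : String) (out : Int) : Prop := out = calculate_letters_alt text
instance (text : String) (out : Int) : Decidable (Spec_calculate_letters text out) := by unfold Spec_calculate_letters; infer_instance

-- ===== CLAIM (what is proved, stated in full; the proofs are below) =====
def Claim_equal_calculate_letters : Prop := ∀ (text : String), Dom_calculate_letters text → Spec_calculate_letters text (calculate_letters text)

-- ===== LEMMAS AND PROOFS =====

-- The two literal letter lists are permutations of each other, so membership agrees.
theorem pv_pred_eq (c : Char) : pvAsciiLetters.contains c = pvSpecialChar.contains c := by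
  have hperm : pvAsciiLetters.Perm pvSpecialChar := by decide
  simp [hperm.mem_iff]

-- Σ over a nodup list containing x of the indicator of x (guarded by p) is the guarded 1.
theorem pv_sum_indicator (p : Char → Bool) (x : Char) :
    ∀ (S : List Char), S.Nodup → x ∈ S →
    (S.map (fun k => if p k then (if k = x then (1 : Int) else 0) else 0)).sum
      = if p x then (1 : Int) else 0 := by
  intro S
  induction S with
  | nil => intro _ hx; simp at hx
  | cons s S ih =>
    intro hnd hx
    rcases List.nodup_cons.mp hnd with ⟨hs, hnd'⟩
    by_cases hsx : s = x
    · have hzero : (S.map (fun k => if p k then (if k = x then (1 : Int) else 0) else 0)).sum = 0 := by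
        rw [List.sum_eq_zero]
        intro y hy
        rcases List.mem_map.mp hy with ⟨k, hk, rfl⟩
        have hknx : k ≠ x := fun h => hs (by rw [hsx, ← h]; exact hk)
        simp [hknx]
      simp [List.map_cons, List.sum_cons, hsx, hzero]
    · have hx' : x ∈ S := by
        rcases List.mem_cons.mp hx with h | h
        · exact absurd h.symm hsx
        · exact h
      have hsx' : s ≠ x := hsx
      simp [List.map_cons, List.sum_cons, hsx', ih hnd' hx']

-- Σ over distinct keys of (guarded count in xs) equals countP of xs.
theorem pv_sum_if_count (p : Char → Bool) :
    ∀ (xs S : List Char), S.Nodup → (∀ x ∈ xs, x ∈ S) →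
    (S.map (fun k => if p k then (xs.count k : Int) else 0)).sum = (xs.countP p : Int) := by
  intro xs
  induction xs with
  | nil =>
    intro S _ _
    simp
  | cons x xs ih =>
    intro S hnd hsub
    have hxS : x ∈ S := hsub x (List.mem_cons_self)
    have hsub' : ∀ y ∈ xs, y ∈ S := fun y hy => hsub y (List.mem_cons_of_mem _ hy)
    have hmap : (S.map (fun k => if p k then ((x :: xs).count k : Int) else 0))
        = S.map (fun k => (if p k then (xs.count k : Int) else 0)
                        + (if p k then (if k = x then (1 : Int) else 0) else 0)) := by
      apply List.map_congr_left
      intro k _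
      by_cases hpk : p k
      · by_cases hkx : k = x
        · subst hkx
          simp only [hpk, List.count_cons_self]
          push_cast
          ring
        · have hxk : ¬ x = k := fun h => hkx h.symm
          have hcnt : (x :: xs).count k = xs.count k := by
            rw [List.count_cons]; simp [hxk]
          simp [hpk, hcnt, hkx]
      · simp [hpk]
    rw [hmap, List.sum_map_add, ih S hnd hsub', pv_sum_indicator p x S hnd hxS,
        List.countP_cons]
    by_cases hpx : p x <;> simp [hpx]

-- A guarded-accumulate fold equals the sum of the guarded values.
theorem pv_foldl_if_add (p : Char → Bool) (g : Char → Int) (L : List Char) (a : Int) :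
    L.foldl (fun acc k => if p k then acc + g k else acc) a
      = a + (L.map (fun k => if p k then g k else 0)).sum := by
  induction L generalizing a with
  | nil => simp
  | cons k L ih =>
    by_cases hpk : p k <;> simp [List.foldl_cons, hpk, ih]
    ring

theorem calculate_letters_eq (text : String) :
    calculate_letters text = calculate_letters_alt text := by
  unfold calculate_letters calculate_letters_alt
  set xs := text.toList with hxs
  show _ = List.foldl _ 0 (PySem.Dict.counter xs).items
  rw [PySem.Dict.items_counter, List.foldl_map]
  have hA : xs.foldl (fun letters char =>
      if pvSpecialChar.contains char then letters + 1 else letters) 0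
      = (xs.countP (fun c => pvSpecialChar.contains c) : Int) := by
    rw [pv_foldl_if_add (fun c => pvSpecialChar.contains c) (fun _ => (1 : Int)) xs 0]
    rw [PySem.List.sum_map_ite_one_zero, Int.zero_add]
  rw [hA]
  dsimp only
  rw [pv_foldl_if_add (fun c => pvAsciiLetters.contains c) _ _ 0]
  rw [pv_sum_if_count (fun c => pvAsciiLetters.contains c) xs (PySem.Set.ofList xs)
        (PySem.Set.nodup_ofList xs) (fun x hx => (PySem.Set.mem_ofList xs x).mpr hx)]
  have hcnt : xs.countP (fun c => pvSpecialChar.contains c)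
      = xs.countP (fun c => pvAsciiLetters.contains c) :=
    List.countP_congr (fun c _ => by rw [pv_pred_eq c])
  rw [hcnt, Int.zero_add]

-- ===== VERDICT (by name: the statement is the Claim_ definition above) =====
theorem calculate_letters_spec : Claim_equal_calculate_letters := by
  intro text _
  exact calculate_letters_eq text
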